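-- pv_equiv track=rewrite | github.com/maomao905/algo | pramp/drone-flight-planner.py | calc_drone_min_energy
-- ===== SOURCE A (Python) =====
-- def calc_drone_min_energy(route):
--   cur = 0
--   min_energy = 0
--   N=len(route)
--   for i in range(1,N):
--     cur +=  route[i-1][2] - route[i][2]
--     min_energy = min(min_energy, cur)
--
--   return -min_energy
-- ===== SOURCE B (Python) =====
-- def calc_drone_min_energy(route):
--     if not route:
--         return 0
--     start = route[0][2]
--     return max(0, max(p[2] for p in route) - start)
-- ===== Notes on version B (the rewrite author's own statement) =====
-- stated objective: simpler
-- what changed: The cumulative delta z0-z_i telescopes, so B replaces A's running-sum-plus-running-minimum loop with a single maximum of the altitudes: max(0, max altitude - start altitude).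
import Mathlib
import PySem

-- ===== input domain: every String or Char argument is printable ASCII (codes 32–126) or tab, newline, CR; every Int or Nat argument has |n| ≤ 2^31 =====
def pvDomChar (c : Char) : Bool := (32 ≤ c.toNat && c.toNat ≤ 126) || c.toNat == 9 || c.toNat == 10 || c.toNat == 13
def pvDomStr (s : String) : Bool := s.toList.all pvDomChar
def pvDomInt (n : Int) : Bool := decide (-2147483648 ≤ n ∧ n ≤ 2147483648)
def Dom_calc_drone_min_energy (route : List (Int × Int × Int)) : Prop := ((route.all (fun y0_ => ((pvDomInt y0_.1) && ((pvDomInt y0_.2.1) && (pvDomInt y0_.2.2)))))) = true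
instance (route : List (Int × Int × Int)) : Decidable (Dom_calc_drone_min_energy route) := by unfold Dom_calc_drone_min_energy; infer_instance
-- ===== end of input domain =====

-- B replaces A's running-delta-plus-running-minimum loop by a single maximum of
-- the altitudes (the delta telescopes): simpler, same O(n) cost.

-- ===== PORT A =====
-- literal transliteration of A's index loop; pyGetD is exact here: every index
-- i and i-1 drawn from range(1, len(route)) is in range.
def calc_drone_min_energy (route : List (Int × Int × Int)) : Int :=
  let N : Int := route.length
  let st := (PySem.List.pyRange 1 N 1).foldl
    (fun (st : Int × Int) i =>
      let cur := st.1 + ((PySem.List.pyGetD route (i-1) (0,0,0)).2.2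
                          - (PySem.List.pyGetD route i (0,0,0)).2.2)
      (cur, min st.2 cur)) (0, 0)
  let res := -st.2
  res

-- ===== PORT B =====
def calc_drone_min_energy_alt (route : List (Int × Int × Int)) : Int :=
  match route with
  | [] => 0
  | p :: rest =>
    let start := p.2.2
    let m := rest.foldl (fun acc q => max acc q.2.2) p.2.2   -- max(p[2] for p in route)
    max 0 (m - start)

-- ===== PRECONDITION & SPEC =====
def Spec_calc_drone_min_energy (route : List (Int × Int × Int)) (out : Int) : Prop := out = calc_drone_min_energy_alt route
instance (route : List (Int × Int × Int)) (out : Int) : Decidable (Spec_calc_drone_min_energy route out) := by unfold Spec_calc_drone_min_energy; infer_instance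

-- ===== CLAIM (what is proved, stated in full; the proofs are below) =====
def Claim_equal_calc_drone_min_energy : Prop := ∀ (route : List (Int × Int × Int)), Dom_calc_drone_min_energy route → Spec_calc_drone_min_energy route (calc_drone_min_energy route)

-- ===== LEMMAS AND PROOFS =====

-- indexing the extended list (route ++ [q]) below the old length is unchanged
theorem getD_append_sing {xs : List (Int × Int × Int)} (q d : Int × Int × Int)
    (i : Int) (h0 : 0 ≤ i) (h1 : i < (xs.length : Int)) :
    PySem.List.pyGetD (xs ++ [q]) i d = PySem.List.pyGetD xs i d := by
  rw [PySem.List.pyGetD_eq_getElem _ d h0 (by simp; omega),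
      PySem.List.pyGetD_eq_getElem _ d h0 h1]
  exact List.getElem_append_left (by omega)

-- A's loop over indices 1..N-1 equals a structural fold over the tail:
-- it ends at (z0 - z_last, min over the tail of (z0 - z_i) together with 0).
theorem loopA_char (p : Int × Int × Int) (rest : List (Int × Int × Int)) :
    (PySem.List.pyRange 1 (((p :: rest).length : Int)) 1).foldl
      (fun (st : Int × Int) i =>
        let cur := st.1 + ((PySem.List.pyGetD (p :: rest) (i-1) (0,0,0)).2.2
                            - (PySem.List.pyGetD (p :: rest) i (0,0,0)).2.2)
        (cur, min st.2 cur)) (0, 0)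
    = (p.2.2 - ((p :: rest).getLast (by simp)).2.2,
       rest.foldl (fun m q => min m (p.2.2 - q.2.2)) 0) := by
  induction rest using List.reverseRecOn with
  | nil => simp [PySem.List.pyRange_one_eq_nil (by norm_num : (1:Int) ≤ 1)]
  | append_singleton rs q ih =>
    have hlen : (((p :: (rs ++ [q])).length : Int)) = ((p :: rs).length : Int) + 1 := by
      simp
    rw [hlen, PySem.List.pyRange_one_succ_right (by simp), List.foldl_append]
    have hcons : p :: (rs ++ [q]) = (p :: rs) ++ [q] := by simp
    have hcongr :
        (PySem.List.pyRange 1 (((p :: rs).length : Int)) 1).foldl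
          (fun (st : Int × Int) i =>
            let cur := st.1 + ((PySem.List.pyGetD (p :: (rs ++ [q])) (i-1) (0,0,0)).2.2
                                - (PySem.List.pyGetD (p :: (rs ++ [q])) i (0,0,0)).2.2)
            (cur, min st.2 cur)) (0, 0)
        = (PySem.List.pyRange 1 (((p :: rs).length : Int)) 1).foldl
          (fun (st : Int × Int) i =>
            let cur := st.1 + ((PySem.List.pyGetD (p :: rs) (i-1) (0,0,0)).2.2
                                - (PySem.List.pyGetD (p :: rs) i (0,0,0)).2.2)
            (cur, min st.2 cur)) (0, 0) := by
      apply PySem.List.foldl_congr_mem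
      intro acc x hx
      rw [PySem.List.mem_pyRange_one] at hx
      simp only [List.length_cons] at hx
      rw [hcons, getD_append_sing q (0,0,0) (x-1) (by omega) (by simp only [List.length_cons]; omega),
          getD_append_sing q (0,0,0) x (by omega) (by simp only [List.length_cons]; omega)]
    rw [hcongr, ih]
    -- the final step, at index (p :: rs).length
    have hq : PySem.List.pyGetD (p :: (rs ++ [q])) (((p :: rs).length : Int)) (0,0,0) = q := by
      rw [hcons, PySem.List.pyGetD_eq_getElem _ (0,0,0) (by omega) (by simp)]
      simp
    have hlast : PySem.List.pyGetD (p :: (rs ++ [q])) (((p :: rs).length : Int) - 1) (0,0,0)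
        = (p :: rs).getLast (by simp) := by
      rw [hcons, getD_append_sing q (0,0,0) _ (by simp only [List.length_cons]; omega)
            (by simp only [List.length_cons]; omega)]
      rw [PySem.List.pyGetD_eq_getElem _ (0,0,0) (by simp only [List.length_cons]; omega)
            (by simp only [List.length_cons]; omega)]
      rw [List.getLast_eq_getElem]
      congr 1
      simp
    simp only [List.foldl_cons, List.foldl_nil, hq, hlast, List.foldl_append]
    rw [Prod.ext_iff]
    refine ⟨by simp; try ring, ?_⟩
    have h2 : p.2.2 - ((p :: rs).getLast (by simp)).2.2
        + (((p :: rs).getLast (by simp)).2.2 - q.2.2) = p.2.2 - q.2.2 := by ring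
    simp only [h2]

-- the min of (z0 - z_i) is z0 minus the max of the z_i
theorem minfold_eq (rest : List (Int × Int × Int)) (z0 : Int) : ∀ M : Int,
    rest.foldl (fun m q => min m (z0 - q.2.2)) (z0 - M)
    = z0 - rest.foldl (fun m q => max m q.2.2) M := by
  induction rest with
  | nil => intro M; simp
  | cons q rs ih =>
    intro M
    have h : min (z0 - M) (z0 - q.2.2) = z0 - max M q.2.2 := by omega
    simpa [h] using ih (max M q.2.2)

-- ===== VERDICT (by name: the statement is the Claim_ definition above) =====
theorem calc_drone_min_energy_spec : Claim_equal_calc_drone_min_energy := by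
  unfold Claim_equal_calc_drone_min_energy
  intro route _
  unfold Spec_calc_drone_min_energy calc_drone_min_energy calc_drone_min_energy_alt
  match route with
  | [] => simp [PySem.List.pyRange_one_eq_nil (by norm_num : (0:Int) ≤ 1)]
  | p :: rest =>
    simp only []
    rw [loopA_char]
    have h0 : (0 : Int) = p.2.2 - p.2.2 := by ring
    rw [h0, minfold_eq]
    have hle := (PySem.List.le_foldl_max_int rest (fun q => q.2.2) p.2.2).1
    simp only [] at hle ⊢
    omega
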